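-- pv_equiv track=rewrite | github.com/kiruba11k/Company-looker-Sharp | app.py | generate_sme_jobs_output
-- ===== SOURCE A (Python) =====
-- def generate_sme_jobs_output(job_listings):
--     """Generate TSV output for SME job listings with proper source verification"""
--     if not job_listings:
--         return "No SME job listings found"
--
--     output_lines = ["Company\tJob Title\tPlatform\tRole Type\tTechnology\tLocation\tCompany Size\tIndustry\tLink\tDate Found\tSource Verified\tDescription"]
--
--     for job in job_listings:
--         company = str(job.get('Company', '')).replace('\t', ' ')
--         job_title = str(job.get('Job Title', '')).replace('\t', ' ')
--         platform = str(job.get('Platform', '')).replace('\t', ' ')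
--         role_type = str(job.get('Role Type', 'General')).replace('\t', ' ')
--         technology = str(job.get('Technology', '')).replace('\t', ' ')
--         location = str(job.get('Location', '')).replace('\t', ' ')
--         company_size = str(job.get('Company Size', 'SME')).replace('\t', ' ')
--         industry = str(job.get('Industry', 'Various')).replace('\t', ' ')
--         link = str(job.get('Link', '')).replace('\t', ' ')
--         date_found = str(job.get('Date Found', ''))
--         source_verified = str(job.get('Source Verified', 'Generated'))
--         description = str(job.get('Description', '')).replace('\t', ' ').replace('\n', ' ')
--
--         output_line = f"{company}\t{job_title}\t{platform}\t{role_type}\t{technology}\t{location}\t{company_size}\t{industry}\t{link}\t{date_found}\t{source_verified}\t{description}"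
--         output_lines.append(output_line)
--
--     return "\n".join(output_lines)
-- ===== SOURCE B (Python) =====
-- SPEC = [
--     ('Company', '', [('\t', ' ')]),
--     ('Job Title', '', [('\t', ' ')]),
--     ('Platform', '', [('\t', ' ')]),
--     ('Role Type', 'General', [('\t', ' ')]),
--     ('Technology', '', [('\t', ' ')]),
--     ('Location', '', [('\t', ' ')]),
--     ('Company Size', 'SME', [('\t', ' ')]),
--     ('Industry', 'Various', [('\t', ' ')]),
--     ('Link', '', [('\t', ' ')]),
--     ('Date Found', '', []),
--     ('Source Verified', 'Generated', []),
--     ('Description', '', [('\t', ' '), ('\n', ' ')]),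
-- ]
--
-- HEADER = '\t'.join(key for key, _d, _r in SPEC)
--
--
-- def _cell(job, key, default, reps):
--     value = str(job.get(key, default))
--     for old, new in reps:
--         value = value.replace(old, new)
--     return value
--
--
-- def generate_sme_jobs_output(job_listings):
--     """Generate the TSV column-major: one full column per field, then transpose."""
--     if not job_listings:
--         return "No SME job listings found"
--     columns = [[_cell(job, key, d, r) for job in job_listings] for key, d, r in SPEC]
--     rows = ['\t'.join(row) for row in zip(*columns)]
--     return '\n'.join([HEADER] + rows)
-- ===== Notes on version B (the rewrite author's own statement) =====
-- stated objective: alternative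
-- what changed: B builds the table column-major: for each field in a spec table it computes the whole column across all jobs, then transposes with zip(*columns) and joins rows, instead of A's row-major straight-line extraction of twelve fields per job.
import Mathlib
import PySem

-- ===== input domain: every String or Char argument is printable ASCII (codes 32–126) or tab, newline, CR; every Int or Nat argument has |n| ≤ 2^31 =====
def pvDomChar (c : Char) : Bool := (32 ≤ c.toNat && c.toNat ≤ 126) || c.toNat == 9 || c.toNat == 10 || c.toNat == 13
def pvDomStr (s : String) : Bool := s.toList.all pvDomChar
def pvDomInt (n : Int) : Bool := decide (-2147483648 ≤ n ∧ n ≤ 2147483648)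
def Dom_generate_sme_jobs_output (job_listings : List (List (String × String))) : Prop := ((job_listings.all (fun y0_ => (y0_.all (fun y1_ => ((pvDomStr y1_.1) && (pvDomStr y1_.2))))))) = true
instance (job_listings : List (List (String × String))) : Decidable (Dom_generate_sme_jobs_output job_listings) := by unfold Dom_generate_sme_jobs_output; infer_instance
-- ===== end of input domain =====

-- B builds the TSV column-major (one full column per spec-table field, then a
-- zip transpose into rows) instead of A's row-major twelve-assignment lines.

-- ===== PORT A =====
def generate_sme_jobs_output (job_listings : List (List (String × String))) : String :=
  if job_listings = [] then "No SME job listings found"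
  else
    let output_lines : List String :=
      ["Company\tJob Title\tPlatform\tRole Type\tTechnology\tLocation\tCompany Size\tIndustry\tLink\tDate Found\tSource Verified\tDescription"]
    let output_lines := job_listings.foldl (fun acc job =>
      let company := PySem.Str.replace (PySem.Dict.getD ⟨job⟩ "Company" "") "\t" " "
      let job_title := PySem.Str.replace (PySem.Dict.getD ⟨job⟩ "Job Title" "") "\t" " "
      let platform := PySem.Str.replace (PySem.Dict.getD ⟨job⟩ "Platform" "") "\t" " "
      let role_type := PySem.Str.replace (PySem.Dict.getD ⟨job⟩ "Role Type" "General") "\t" " "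
      let technology := PySem.Str.replace (PySem.Dict.getD ⟨job⟩ "Technology" "") "\t" " "
      let location := PySem.Str.replace (PySem.Dict.getD ⟨job⟩ "Location" "") "\t" " "
      let company_size := PySem.Str.replace (PySem.Dict.getD ⟨job⟩ "Company Size" "SME") "\t" " "
      let industry := PySem.Str.replace (PySem.Dict.getD ⟨job⟩ "Industry" "Various") "\t" " "
      let link := PySem.Str.replace (PySem.Dict.getD ⟨job⟩ "Link" "") "\t" " "
      let date_found := PySem.Dict.getD ⟨job⟩ "Date Found" ""
      let source_verified := PySem.Dict.getD ⟨job⟩ "Source Verified" "Generated"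
      let description := PySem.Str.replace (PySem.Str.replace (PySem.Dict.getD ⟨job⟩ "Description" "") "\t" " ") "\n" " "
      let output_line := company ++ "\t" ++ job_title ++ "\t" ++ platform ++ "\t" ++ role_type
        ++ "\t" ++ technology ++ "\t" ++ location ++ "\t" ++ company_size ++ "\t" ++ industry
        ++ "\t" ++ link ++ "\t" ++ date_found ++ "\t" ++ source_verified ++ "\t" ++ description
      acc ++ [output_line]) output_lines
    PySem.Str.join "\n" output_lines

-- ===== PORT B =====
def pvSpec : List (String × String × List (String × String)) :=
  [ ("Company", "", [("\t", " ")]),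
    ("Job Title", "", [("\t", " ")]),
    ("Platform", "", [("\t", " ")]),
    ("Role Type", "General", [("\t", " ")]),
    ("Technology", "", [("\t", " ")]),
    ("Location", "", [("\t", " ")]),
    ("Company Size", "SME", [("\t", " ")]),
    ("Industry", "Various", [("\t", " ")]),
    ("Link", "", [("\t", " ")]),
    ("Date Found", "", []),
    ("Source Verified", "Generated", []),
    ("Description", "", [("\t", " "), ("\n", " ")]) ]

def pvHeader : String := PySem.Str.join "\t" (pvSpec.map (fun spec => spec.1))

def pvCell (job : List (String × String)) (spec : String × String × List (String × String)) : String :=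
  spec.2.2.foldl (fun w r => PySem.Str.replace w r.1 r.2)
    (PySem.Dict.getD ⟨job⟩ spec.1 spec.2.1)

-- Python's zip(*columns): rows of heads while every column is nonempty.
def pvZip (cols : List (List String)) : List (List String) :=
  match cols with
  | [] => []
  | c :: rest =>
    if h : (c :: rest).all (fun l => !l.isEmpty)
    then ((c :: rest).map (fun l => l.headD "")) :: pvZip ((c :: rest).map List.tail)
    else []
termination_by cols.headD []
decreasing_by
  simp only [List.all_cons, Bool.and_eq_true, Bool.not_eq_true', List.isEmpty_eq_false_iff] at h
  cases c with
  | nil => exact absurd rfl h.1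
  | cons a t => simp [List.headD]

def generate_sme_jobs_output_alt (job_listings : List (List (String × String))) : String :=
  if job_listings = [] then "No SME job listings found"
  else
    let columns := pvSpec.map (fun spec => job_listings.map (fun job => pvCell job spec))
    let rows := (pvZip columns).map (fun row => PySem.Str.join "\t" row)
    PySem.Str.join "\n" (pvHeader :: rows)

-- ===== PRECONDITION & SPEC =====
def Spec_generate_sme_jobs_output (job_listings : List (List (String × String))) (out : String) : Prop := out = generate_sme_jobs_output_alt job_listings
instance (job_listings : List (List (String × String))) (out : String) : Decidable (Spec_generate_sme_jobs_output job_listings out) := by unfold Spec_generate_sme_jobs_output; infer_instance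

-- ===== CLAIM (what is proved, stated in full; the proofs are below) =====
def Claim_equal_generate_sme_jobs_output : Prop := ∀ (job_listings : List (List (String × String))), Dom_generate_sme_jobs_output job_listings → Spec_generate_sme_jobs_output job_listings (generate_sme_jobs_output job_listings)

-- ===== LEMMAS AND PROOFS =====

-- Transposing equal-length columns built by mapping functions over the jobs
-- recovers the row-major table.
theorem pvZip_map_map {α : Type} (fs : List (α → String)) (hfs : fs ≠ [])
    (jobs : List α) :
    pvZip (fs.map (fun f => jobs.map f)) = jobs.map (fun j => fs.map (fun f => f j)) := by
  induction jobs with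
  | nil =>
    cases fs with
    | nil => exact absurd rfl hfs
    | cons f fs' => simp [pvZip]
  | cons j rest ih =>
    cases fs with
    | nil => exact absurd rfl hfs
    | cons f fs' =>
      rw [show ((f :: fs').map (fun g => (j :: rest).map g))
            = ((f j :: rest.map f) :: fs'.map (fun g => g j :: rest.map g)) by simp,
          pvZip]
      have hall : ((f j :: rest.map f) :: fs'.map (fun g => g j :: rest.map g)).all
          (fun l => !l.isEmpty) = true := by
        simp [List.all_eq_true]
      rw [dif_pos hall]
      have htails : ((f j :: rest.map f) :: fs'.map (fun g => g j :: rest.map g)).map List.tail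
          = (f :: fs').map (fun g => rest.map g) := by
        simp [List.map_map, Function.comp]
      have hheads : ((f j :: rest.map f) :: fs'.map (fun g => g j :: rest.map g)).map
          (fun l => l.headD "") = (f :: fs').map (fun g => g j) := by
        simp [List.map_map, Function.comp]
      rw [htails, hheads, ih]
      simp

-- Per-job row: A's f-string equals B's spec-table cells joined with a tab.
theorem pv_row_eq (job : List (String × String)) :
    (PySem.Str.replace (PySem.Dict.getD ⟨job⟩ "Company" "") "\t" " " ++ "\t"
      ++ PySem.Str.replace (PySem.Dict.getD ⟨job⟩ "Job Title" "") "\t" " " ++ "\t"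
      ++ PySem.Str.replace (PySem.Dict.getD ⟨job⟩ "Platform" "") "\t" " " ++ "\t"
      ++ PySem.Str.replace (PySem.Dict.getD ⟨job⟩ "Role Type" "General") "\t" " " ++ "\t"
      ++ PySem.Str.replace (PySem.Dict.getD ⟨job⟩ "Technology" "") "\t" " " ++ "\t"
      ++ PySem.Str.replace (PySem.Dict.getD ⟨job⟩ "Location" "") "\t" " " ++ "\t"
      ++ PySem.Str.replace (PySem.Dict.getD ⟨job⟩ "Company Size" "SME") "\t" " " ++ "\t"
      ++ PySem.Str.replace (PySem.Dict.getD ⟨job⟩ "Industry" "Various") "\t" " " ++ "\t"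
      ++ PySem.Str.replace (PySem.Dict.getD ⟨job⟩ "Link" "") "\t" " " ++ "\t"
      ++ PySem.Dict.getD ⟨job⟩ "Date Found" "" ++ "\t"
      ++ PySem.Dict.getD ⟨job⟩ "Source Verified" "Generated" ++ "\t"
      ++ PySem.Str.replace (PySem.Str.replace (PySem.Dict.getD ⟨job⟩ "Description" "") "\t" " ") "\n" " ")
    = PySem.Str.join "\t" (pvSpec.map (fun spec => pvCell job spec)) := by
  refine String.toList_inj.mp ?_
  simp [pvSpec, pvCell, PySem.Chars.join_cons_cons, PySem.Chars.join_singleton]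

theorem pv_header_eq :
    "Company\tJob Title\tPlatform\tRole Type\tTechnology\tLocation\tCompany Size\tIndustry\tLink\tDate Found\tSource Verified\tDescription" = pvHeader := by
  refine String.toList_inj.mp ?_
  simp [pvHeader, pvSpec, PySem.Chars.join_cons_cons, PySem.Chars.join_singleton]

-- ===== VERDICT (by name: the statement is the Claim_ definition above) =====
set_option maxHeartbeats 1000000 in
theorem generate_sme_jobs_output_spec : Claim_equal_generate_sme_jobs_output := by
  intro jl _
  unfold Spec_generate_sme_jobs_output generate_sme_jobs_output generate_sme_jobs_output_alt
  by_cases h : jl = []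
  · simp [h]
  · simp only [h, reduceIte, PySem.List.foldl_append_singleton_eq_map,
      List.singleton_append]
    refine congrArg (PySem.Str.join "\n") ?_
    refine congrArg₂ List.cons pv_header_eq ?_
    rw [show (pvSpec.map (fun spec => jl.map (fun job => pvCell job spec)))
          = ((pvSpec.map (fun spec => fun job => pvCell job spec)).map (fun f => jl.map f)) by
        simp [List.map_map],
      pvZip_map_map _ (by simp [pvSpec]) jl]
    simp only [List.map_map]
    refine List.map_congr_left fun job _ => ?_
    rw [pv_row_eq job]
    rfl
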